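-- pv_equiv track=rewrite | github.com/ianzachary/3xb3_lab1 | selection2.py | findMaxMin_index
-- ===== SOURCE A (Python) =====
-- def findMaxMin_index(L, n, k):
--     min_index = n
--     max_index = n
--     for i in range(n+1, k+1):
--         if L[i] < L[min_index]:
--             min_index = i
--         elif L[i] > L[max_index]:
--             max_index = i
--     return min_index, max_index
-- ===== SOURCE B (Python) =====
-- def findMaxMin_index(L, n, k):
--     if k <= n:
--         return n, n
--     idx = range(n, k + 1)
--     return min(idx, key=L.__getitem__), max(idx, key=L.__getitem__)
-- ===== Notes on version B (the rewrite author's own statement) =====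
-- stated objective: idiomatic
-- what changed: Replaces the single interleaved loop with mutable min/max state by a degenerate-range early return plus two independent built-in scans min(range(n,k+1), key=L.__getitem__) and max(range(n,k+1), key=L.__getitem__).
import Mathlib
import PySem

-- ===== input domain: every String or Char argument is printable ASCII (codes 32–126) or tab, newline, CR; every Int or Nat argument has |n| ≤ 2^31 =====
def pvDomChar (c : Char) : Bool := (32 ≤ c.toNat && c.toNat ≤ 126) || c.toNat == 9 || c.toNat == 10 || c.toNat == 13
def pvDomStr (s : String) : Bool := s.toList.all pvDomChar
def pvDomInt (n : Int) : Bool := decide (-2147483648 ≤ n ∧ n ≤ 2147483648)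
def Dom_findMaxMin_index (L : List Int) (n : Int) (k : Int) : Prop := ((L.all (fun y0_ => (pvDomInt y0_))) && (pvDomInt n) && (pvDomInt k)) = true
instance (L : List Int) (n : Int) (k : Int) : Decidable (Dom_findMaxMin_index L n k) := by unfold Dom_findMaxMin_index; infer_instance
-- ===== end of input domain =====

-- B replaces A's single interleaved loop by an early return for k ≤ n plus two
-- independent built-in scans (min / max with key over the index range); same cost,
-- more idiomatic.

-- ===== PORT A =====
-- A's loop over range(n+1, k+1), carrying (min_index, max_index); none = IndexError.
def findMaxMin_index (L : List Int) (n : Int) (k : Int) : Int × Int :=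
  ((PySem.List.pyRange (n+1) (k+1) 1).foldl
    (fun st i =>
      match st with
      | none => none
      | some (mi, ma) =>
        match PySem.List.pyGet? L i, PySem.List.pyGet? L mi, PySem.List.pyGet? L ma with
        | some li, some lmi, some lma =>
            if li < lmi then some (i, ma)
            else if li > lma then some (mi, i)
            else some (mi, ma)
        | _, _, _ => none)
    (some (n, n))).getD (0, 0)

-- ===== PORT B =====
def findMaxMin_index_alt (L : List Int) (n : Int) (k : Int) : Int × Int :=
  if k ≤ n then (n, n)
  else
    (PySem.List.minD (PySem.List.pyRange n (k+1) 1) (fun i => PySem.List.pyGetD L i 0) n,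
     PySem.List.maxD (PySem.List.pyRange n (k+1) 1) (fun i => PySem.List.pyGetD L i 0) n)

-- ===== PRECONDITION & SPEC =====
-- Pre_ excludes exactly the inputs where A raises IndexError: a nondegenerate
-- range (k > n) with an endpoint outside Python's (negative-index-aware) bounds.
def Pre_findMaxMin_index (L : List Int) (n : Int) (k : Int) : Prop :=
  k ≤ n ∨ (-(L.length : Int) ≤ n ∧ k < (L.length : Int))
instance (L : List Int) (n : Int) (k : Int) : Decidable (Pre_findMaxMin_index L n k) := by
  unfold Pre_findMaxMin_index; infer_instance

def pvWitness_findMaxMin_index : List Int × Int × Int := ([3, 1, 2], 0, 2)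

def Spec_findMaxMin_index (L : List Int) (n : Int) (k : Int) (out : Int × Int) : Prop := out = findMaxMin_index_alt L n k
instance (L : List Int) (n : Int) (k : Int) (out : Int × Int) : Decidable (Spec_findMaxMin_index L n k out) := by unfold Spec_findMaxMin_index; infer_instance

-- ===== CLAIM (what is proved, stated in full; the proofs are below) =====
def Claim_equal_findMaxMin_index : Prop := ∀ (L : List Int) (n : Int) (k : Int), Dom_findMaxMin_index L n k → Pre_findMaxMin_index L n k → Spec_findMaxMin_index L n k (findMaxMin_index L n k)

-- ===== LEMMAS AND PROOFS =====

-- pyGet? succeeds (with the pyGetD value) on an in-range index.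
theorem pyGet?_eq_some_pyGetD {L : List Int} {i : Int}
    (h : PySem.Raise.InRange L.length i) :
    PySem.List.pyGet? L i = some (PySem.List.pyGetD L i 0) := by
  rcases hg : PySem.List.pyGet? L i with _ | v
  · exact absurd ((PySem.List.pyGet?_eq_none_iff _ _).mp hg) (by simpa using h)
  · simp [PySem.List.pyGetD, hg]

-- A's Option-carrying fold equals the pure fold when every index seen is in range.
theorem optionFold_eq_pureFold (L : List Int) (l : List Int) (m0 M0 : Int)
    (hl : ∀ i ∈ l, PySem.Raise.InRange L.length i)
    (hm : PySem.Raise.InRange L.length m0) (hM : PySem.Raise.InRange L.length M0) :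
    l.foldl
      (fun st i =>
        match st with
        | none => none
        | some (mi, ma) =>
          match PySem.List.pyGet? L i, PySem.List.pyGet? L mi, PySem.List.pyGet? L ma with
          | some li, some lmi, some lma =>
              if li < lmi then some (i, ma)
              else if li > lma then some (mi, i)
              else some (mi, ma)
          | _, _, _ => none)
      (some (m0, M0))
    = some (l.foldl
        (fun p i =>
          if PySem.List.pyGetD L i 0 < PySem.List.pyGetD L p.1 0 then (i, p.2)
          else if PySem.List.pyGetD L p.2 0 < PySem.List.pyGetD L i 0 then (p.1, i)
          else p)
        (m0, M0)) := by
  induction l generalizing m0 M0 with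
  | nil => rfl
  | cons i t ih =>
    have hi := hl i (by simp)
    have ht : ∀ j ∈ t, PySem.Raise.InRange L.length j := fun j hj => hl j (by simp [hj])
    simp only [List.foldl_cons, pyGet?_eq_some_pyGetD hi, pyGet?_eq_some_pyGetD hm,
      pyGet?_eq_some_pyGetD hM]
    by_cases h1 : PySem.List.pyGetD L i 0 < PySem.List.pyGetD L m0 0
    · simp only [if_pos h1]
      exact ih i M0 ht hi hM
    · simp only [if_neg h1]
      by_cases h2 : PySem.List.pyGetD L M0 0 < PySem.List.pyGetD L i 0
      · simp only [gt_iff_lt, if_pos h2]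
        exact ih m0 i ht hm hi
      · simp only [gt_iff_lt, if_neg h2]
        exact ih m0 M0 ht hm hM

-- The interleaved pure fold splits into the two independent running-extremum folds,
-- given the invariant g m0 ≤ g M0 (which A maintains).
theorem pureFold_split (g : Int → Int) (l : List Int) (m0 M0 : Int)
    (hinv : g m0 ≤ g M0) :
    l.foldl
      (fun p i =>
        if g i < g p.1 then (i, p.2)
        else if g p.2 < g i then (p.1, i)
        else p)
      (m0, M0)
    = (l.foldl (fun m i => if g i < g m then i else m) m0,
       l.foldl (fun M i => if g M < g i then i else M) M0) := by
  induction l generalizing m0 M0 with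
  | nil => rfl
  | cons i t ih =>
    simp only [List.foldl_cons]
    by_cases h1 : g i < g m0
    · have hM : ¬ g M0 < g i := by omega
      simp only [if_pos h1, if_neg hM]
      exact ih i M0 (by omega)
    · simp only [if_neg h1]
      by_cases h2 : g M0 < g i
      · simp only [if_pos h2]
        exact ih m0 i (by omega)
      · simp only [if_neg h2]
        exact ih m0 M0 hinv

-- B's minD over a nonempty range is the running-first-min fold from its head.
theorem minD_cons (g : Int → Int) (a : Int) (t : List Int) (d : Int) :
    PySem.List.minD (a :: t) g d
      = t.foldl (fun m i => if g i < g m then i else m) a := by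
  simp only [PySem.List.minD, PySem.List.min?, List.foldl_cons]
  induction t generalizing a with
  | nil => rfl
  | cons x t ih =>
    simp only [List.foldl_cons]
    by_cases h : g x < g a
    · simpa [h] using ih x
    · simpa [h] using ih a

theorem maxD_cons (g : Int → Int) (a : Int) (t : List Int) (d : Int) :
    PySem.List.maxD (a :: t) g d
      = t.foldl (fun M i => if g M < g i then i else M) a := by
  simp only [PySem.List.maxD, PySem.List.max?, List.foldl_cons]
  induction t generalizing a with
  | nil => rfl
  | cons x t ih =>
    simp only [List.foldl_cons]
    by_cases h : g a < g x
    · simpa [h] using ih x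
    · simpa [h] using ih a

-- ===== VERDICT (by name: the statement is the Claim_ definition above) =====
theorem findMaxMin_index_spec : Claim_equal_findMaxMin_index := by
  intro L n k _ hpre
  unfold Spec_findMaxMin_index findMaxMin_index findMaxMin_index_alt
  by_cases hkn : k ≤ n
  · rw [PySem.List.pyRange_one_eq_nil (by omega)]
    simp [hkn]
  · rcases hpre with h | ⟨hlo, hhi⟩
    · omega
    have hrange : ∀ i ∈ PySem.List.pyRange (n+1) (k+1) 1, PySem.Raise.InRange L.length i := by
      intro i hi
      rw [PySem.List.mem_pyRange_one] at hi
      exact ⟨by omega, by omega⟩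
    have hn : PySem.Raise.InRange L.length n := ⟨by omega, by omega⟩
    rw [optionFold_eq_pureFold L _ n n hrange hn hn,
        pureFold_split (fun i => PySem.List.pyGetD L i 0) _ n n le_rfl]
    rw [PySem.List.pyRange_one_cons (by omega : n < k + 1)]
    rw [minD_cons, maxD_cons]
    simp [hkn]
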